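-- pv_equiv track=rewrite | github.com/Nostoi/rom24-quickmud-python | mud/commands/imc.py | _render_columns
-- ===== SOURCE A (Python) =====
-- from collections.abc import Iterable
--
-- def _render_columns(topics: Iterable[str]) -> list[str]:
--     columns: list[str] = []
--     row: list[str] = []
--     for topic in topics:
--         row.append(f"{topic:<15}")
--         if len(row) == 6:
--             columns.append("".join(row).rstrip())
--             row = []
--
--     if row:
--         columns.append("".join(row).rstrip())
--
--     return columns
-- ===== SOURCE B (Python) =====
-- def _render_columns(topics):
--     cells = [f"{t:<15}" for t in topics]
--     return ["".join(cells[i:i + 6]).rstrip() for i in range(0, len(cells), 6)]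
-- ===== Notes on version B (the rewrite author's own statement) =====
-- stated objective: simpler
-- what changed: B materialises all padded cells once and builds each output row by slicing the cell list in steps of six, removing A's explicit row buffer, its length==6 flush test and the separate trailing-remainder branch.
import Mathlib
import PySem

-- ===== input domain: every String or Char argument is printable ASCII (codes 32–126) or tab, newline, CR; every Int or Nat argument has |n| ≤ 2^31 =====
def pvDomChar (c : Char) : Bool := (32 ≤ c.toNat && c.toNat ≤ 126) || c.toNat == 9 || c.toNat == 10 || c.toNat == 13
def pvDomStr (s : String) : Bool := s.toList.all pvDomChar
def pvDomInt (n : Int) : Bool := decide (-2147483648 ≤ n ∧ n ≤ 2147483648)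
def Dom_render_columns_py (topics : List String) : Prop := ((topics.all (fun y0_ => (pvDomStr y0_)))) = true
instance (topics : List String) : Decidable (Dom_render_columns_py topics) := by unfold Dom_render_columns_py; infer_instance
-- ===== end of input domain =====

-- B replaces A's explicit row buffer and flush test by padding all cells once and slicing them in
-- steps of six (objective: simpler); return values are proved identical on all inputs.

-- ===== PORT A =====
-- f"{t:<15}": left-justify with spaces to 15 code points (exact on the ASCII domain)
def pad15 (t : String) : String :=
  String.ofList (t.toList ++ List.replicate (15 - t.toList.length) ' ')

-- "".join(row).rstrip()
def finishRow (row : List String) : String :=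
  PySem.Str.rstrip (PySem.Str.join "" row)

-- the 'for topic in topics' loop with its (columns, row) state, then the trailing 'if row:' flush
def renderLoopA : List String → List String → List String → List String
  | [], columns, row => if row ≠ [] then columns ++ [finishRow row] else columns
  | t :: ts, columns, row =>
      let row' := row ++ [pad15 t]
      if row'.length = 6 then renderLoopA ts (columns ++ [finishRow row']) []
      else renderLoopA ts columns row'

def render_columns_py (topics : List String) : List String :=
  renderLoopA topics [] []

-- ===== PORT B =====
def render_columns_py_alt (topics : List String) : List String :=
  let cells := topics.map pad15
  (PySem.List.pyRange 0 (cells.length : Int) 6).map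
    (fun i => finishRow (PySem.List.slice cells (some i) (some (i + 6))))

-- ===== PRECONDITION & SPEC =====
def Spec_render_columns_py (topics : List String) (out : List String) : Prop := out = render_columns_py_alt topics
instance (topics : List String) (out : List String) : Decidable (Spec_render_columns_py topics out) := by unfold Spec_render_columns_py; infer_instance

-- ===== CLAIM (what is proved, stated in full; the proofs are below) =====
def Claim_equal_render_columns_py : Prop := ∀ (topics : List String), Dom_render_columns_py topics → Spec_render_columns_py topics (render_columns_py topics)

-- ===== LEMMAS AND PROOFS =====

-- proof-only normal form: the list of cells chunked into rows of six
def chunks (cells : List String) : List String :=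
  if _h : cells = [] then [] else finishRow (cells.take 6) :: chunks (cells.drop 6)
termination_by cells.length
decreasing_by
  simp only [List.length_drop]
  have : cells.length ≠ 0 := fun h0 => _h (List.eq_nil_of_length_eq_zero h0)
  omega

theorem chunks_nil : chunks [] = [] := by rw [chunks]; simp

theorem chunks_cons (c : List String) (h : c ≠ []) :
    chunks c = finishRow (c.take 6) :: chunks (c.drop 6) := by
  rw [chunks]; simp [h]

theorem loopA_eq (ts : List String) (columns row : List String) (h : row.length < 6) :
    renderLoopA ts columns row = columns ++ chunks (row ++ ts.map pad15) := by
  induction ts generalizing columns row with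
  | nil =>
    simp only [renderLoopA, List.map_nil, List.append_nil]
    by_cases hr : row = []
    · simp [hr, chunks_nil]
    · rw [chunks_cons row hr, List.take_of_length_le (by omega),
        List.drop_eq_nil_of_le (by omega), chunks_nil]
      simp [hr]
  | cons t ts ih =>
    simp only [renderLoopA, List.length_append, List.length_cons, List.length_nil]
    split_ifs with h6
    · rw [ih _ _ (by norm_num)]
      have hne : (row ++ [pad15 t]) ++ ts.map pad15 ≠ [] := by simp
      have : row ++ (t :: ts).map pad15 = (row ++ [pad15 t]) ++ ts.map pad15 := by simp
      rw [this, chunks_cons _ hne]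
      have h6' : (row ++ [pad15 t]).length = 6 := by simpa using h6
      rw [← h6', List.take_left, List.drop_left]
      simp
    · rw [ih _ _ (by simp; omega)]
      simp

theorem chunks_eq_map (n : Nat) (cells : List String) (hn : cells.length ≤ n) :
    chunks cells =
      (List.range ((cells.length + 5) / 6)).map
        (fun k => finishRow ((cells.drop (6 * k)).take 6)) := by
  induction n generalizing cells with
  | zero =>
    have : cells = [] := List.eq_nil_of_length_eq_zero (by omega)
    subst this; simp [chunks_nil]
  | succ n ih =>
    by_cases hc : cells = []
    · subst hc; simp [chunks_nil]
    · have hlen : 0 < cells.length := List.length_pos_iff.mpr hc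
      rw [chunks_cons _ hc]
      have hstep : (cells.length + 5) / 6 = ((cells.drop 6).length + 5) / 6 + 1 := by
        simp only [List.length_drop]; omega
      rw [hstep, List.range_succ_eq_map, List.map_cons, List.map_map]
      have hd : (cells.drop 6).length ≤ n := by simp only [List.length_drop]; omega
      refine congrArg₂ List.cons ?_ ?_
      · simp
      · rw [ih (cells.drop 6) hd]
        apply List.map_congr_left
        intro k _
        simp only [Function.comp_apply, List.drop_drop, Nat.mul_succ,
          Nat.add_comm 6 (6 * k)]

theorem pyB_eq_chunks (cells : List String) :
    (PySem.List.pyRange 0 (cells.length : Int) 6).map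
        (fun i => finishRow (PySem.List.slice cells (some i) (some (i + 6)))) =
      chunks cells := by
  rw [PySem.List.pyRange_of_pos 0 (cells.length : Int) (by norm_num)]
  rw [chunks_eq_map cells.length cells le_rfl]
  have hif : (List.range (if (0 : Int) < (cells.length : Int)
      then (((cells.length : Int) - 0 + 6 - 1) / 6).toNat else 0)) =
      List.range ((cells.length + 5) / 6) := by
    split_ifs with h
    · congr 1; omega
    · have : cells.length = 0 := by omega
      rw [this]
  rw [hif, List.map_map]
  apply List.map_congr_left
  intro k _
  simp only [Function.comp_apply, zero_add]
  have hs := PySem.List.slice_natCast_add cells (6 * k) 6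
  have hcast : ((6 * k : Nat) : Int) = 6 * (k : Int) := by push_cast; ring
  push_cast at hs
  rw [hs]

theorem alt_eq_chunks (topics : List String) :
    render_columns_py_alt topics = chunks (topics.map pad15) :=
  pyB_eq_chunks (topics.map pad15)

-- ===== VERDICT (by name: the statement is the Claim_ definition above) =====
theorem render_columns_py_spec : Claim_equal_render_columns_py := by
  intro topics _
  unfold Spec_render_columns_py render_columns_py
  rw [alt_eq_chunks, loopA_eq topics [] [] (by norm_num)]
  simp
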